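-- pv_equiv track=rewrite | github.com/JoeD42/BF-Joust-plus-plus | bfjpp/lexer.py | inline_getpos
-- ===== SOURCE A (Python) =====
-- def inline_getpos(raw, line, col):
--     for c in raw:
--         if c == "\n":
--             line += 1
--             col = 1
--         else:
--             col += 1
--     return line, col
-- ===== SOURCE B (Python) =====
-- def inline_getpos(raw, line, col):
--     i = raw.rfind("\n")
--     if i == -1:
--         return line, col + len(raw)
--     return line + raw.count("\n"), len(raw) - i
-- ===== Notes on version B (the rewrite author's own statement) =====
-- stated objective: faster
-- what changed: Replaces the per-character line/col accumulator loop with str.rfind/str.count scans and closed-form arithmetic on the tail after the last newline.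
import Mathlib
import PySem

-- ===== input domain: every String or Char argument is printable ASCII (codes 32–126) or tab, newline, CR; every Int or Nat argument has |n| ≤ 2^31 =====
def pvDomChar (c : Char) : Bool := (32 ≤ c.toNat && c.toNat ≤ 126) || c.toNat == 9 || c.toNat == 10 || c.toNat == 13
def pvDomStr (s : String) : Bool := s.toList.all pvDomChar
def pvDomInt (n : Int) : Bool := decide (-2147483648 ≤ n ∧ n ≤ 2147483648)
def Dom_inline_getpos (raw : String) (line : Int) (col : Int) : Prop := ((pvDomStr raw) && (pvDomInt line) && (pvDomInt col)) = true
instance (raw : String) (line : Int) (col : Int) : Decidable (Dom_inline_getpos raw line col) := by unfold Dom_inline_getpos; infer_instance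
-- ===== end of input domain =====

-- B replaces A's per-character accumulator loop with rfind/count string scans and
-- closed-form arithmetic on the tail after the last newline (objective: faster, constant-factor; measured).

-- ===== PORT A =====
-- literal port of A: fold the per-character loop over the string's characters
def inline_getpos (raw : String) (line : Int) (col : Int) : Int × Int :=
  raw.toList.foldl
    (fun (p : Int × Int) c => if c = '\n' then (p.1 + 1, (1 : Int)) else (p.1, p.2 + 1))
    (line, col)

-- ===== PORT B =====
-- literal port of Source B: i = raw.rfind("\n"); no-newline branch col+len, else len-i
def inline_getpos_alt (raw : String) (line : Int) (col : Int) : Int × Int :=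
  let i := PySem.Str.rfind raw "\n"
  if i = -1 then (line, col + PySem.Str.len raw)
  else (line + (PySem.Str.count raw "\n" : Int), PySem.Str.len raw - i)

-- ===== PRECONDITION & SPEC =====
def Spec_inline_getpos (raw : String) (line : Int) (col : Int) (out : Int × Int) : Prop := out = inline_getpos_alt raw line col
instance (raw : String) (line : Int) (col : Int) (out : Int × Int) : Decidable (Spec_inline_getpos raw line col out) := by unfold Spec_inline_getpos; infer_instance

-- ===== CLAIM (what is proved, stated in full; the proofs are below) =====
def Claim_equal_inline_getpos : Prop := ∀ (raw : String) (line : Int) (col : Int), Dom_inline_getpos raw line col → Spec_inline_getpos raw line col (inline_getpos raw line col)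

-- ===== LEMMAS AND PROOFS =====

-- Chars.count with a single-char needle is List.count
theorem count_go_newline (s : List Char) (n k : Nat) (h : s.length ≤ n) :
    PySem.Chars.count.go ['\n'] n s k = k + s.count '\n' := by
  induction s generalizing n k with
  | nil => cases n <;> simp [PySem.Chars.count.go]
  | cons a t ih =>
    cases n with
    | zero => simp at h
    | succ m =>
      simp only [List.length_cons, Nat.succ_le_succ_iff] at h
      by_cases hc : a = '\n'
      · subst hc
        have : (['\n'].isPrefixOf ('\n' :: t)) = true := by simp [List.isPrefixOf]
        simp only [PySem.Chars.count.go, this, if_pos]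
        rw [List.length_singleton, List.drop_one, List.tail_cons, ih m (k + 1) h]
        simp
        omega
      · have : (['\n'].isPrefixOf (a :: t)) = false := by
          simp [List.isPrefixOf]; exact fun h' => (hc h'.symm).elim
        simp only [PySem.Chars.count.go, this]
        rw [if_neg (by simp), ih m k h]
        simp [hc]

theorem count_newline (s : List Char) :
    PySem.Chars.count s ['\n'] = s.count '\n' := by
  unfold PySem.Chars.count
  rw [if_neg (by simp)]
  simpa using count_go_newline s s.length 0 (le_refl _)

-- single-char isPrefixOf
theorem isPrefixOf_newline (l : List Char) :
    (['\n'].isPrefixOf l) = (l.head? == some '\n') := by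
  cases l with
  | nil => simp [List.isPrefixOf]
  | cons a t => simp [List.isPrefixOf, BEq.comm]

-- rfind.go below the length of s ignores an appended character
theorem rfind_go_stable (s : List Char) (c : Char) (n : Nat) (h : n < s.length) :
    PySem.Chars.rfind.go (s ++ [c]) ['\n'] n = PySem.Chars.rfind.go s ['\n'] n := by
  induction n with
  | zero =>
    unfold PySem.Chars.rfind.go
    rw [isPrefixOf_newline, isPrefixOf_newline]
    cases s with
    | nil => simp at h
    | cons a t => simp
  | succ j ih =>
    unfold PySem.Chars.rfind.go
    rw [isPrefixOf_newline, isPrefixOf_newline,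
      List.drop_append_of_le_length (by omega)]
    have hne : List.drop (j + 1) s ≠ [] := by
      simp [List.drop_eq_nil_iff]; omega
    cases hd : List.drop (j + 1) s with
    | nil => exact (hne hd).elim
    | cons a t => simp [ih (by omega)]

-- at fuel = length, the first position checked contributes nothing
theorem rfind_top_succ (s : List Char) (j : Nat) (hl : s.length = j + 1) :
    PySem.Chars.rfind s ['\n'] = PySem.Chars.rfind.go s ['\n'] j := by
  unfold PySem.Chars.rfind
  rw [hl]
  conv_lhs => unfold PySem.Chars.rfind.go
  have hd : List.drop (j + 1) s = [] := by rw [← hl]; exact List.drop_length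
  rw [hd]
  have hp : (['\n'].isPrefixOf ([] : List Char)) = false := rfl
  rw [hp]
  simp

theorem rfind_nil : PySem.Chars.rfind [] ['\n'] = -1 := by decide

theorem rfind_append (s : List Char) (c : Char) :
    PySem.Chars.rfind (s ++ [c]) ['\n'] =
      if c = '\n' then (s.length : Int) else PySem.Chars.rfind s ['\n'] := by
  rw [rfind_top_succ (s ++ [c]) s.length (by simp)]
  cases hl : s.length with
  | zero =>
    have hs : s = [] := List.length_eq_zero_iff.mp hl
    subst hs
    unfold PySem.Chars.rfind.go
    rw [isPrefixOf_newline]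
    by_cases hc : c = '\n'
    · subst hc; simp
    · simp [hc, rfind_nil]
  | succ j =>
    unfold PySem.Chars.rfind.go
    have hd : List.drop (j + 1) (s ++ [c]) = [c] := by
      rw [List.drop_append_of_le_length (by omega), ← hl, List.drop_length, List.nil_append]
    rw [hd, isPrefixOf_newline]
    by_cases hc : c = '\n'
    · subst hc; simp [← hl]
    · simp only [List.head?_cons, beq_iff_eq, Option.some.injEq]
      rw [if_neg (by exact fun h' => hc h'), if_neg hc]
      rw [rfind_go_stable s c j (by omega), ← rfind_top_succ s j hl]

-- rfind = -1 exactly when there is no newline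
theorem rfind_eq_neg_one_iff (s : List Char) :
    PySem.Chars.rfind s ['\n'] = -1 ↔ '\n' ∉ s := by
  induction s using List.reverseRecOn with
  | nil =>
    constructor
    · intro _ h; exact absurd h (List.not_mem_nil)
    · intro _; exact rfind_nil
  | append_singleton t c ih =>
    rw [rfind_append]
    by_cases hc : c = '\n'
    · subst hc; simp
    · simp [hc, ih, List.mem_append, eq_comm]

-- the main invariant: A's fold equals B's closed form, by reverse induction
theorem fold_eq_closed (cs : List Char) (line col : Int) :
    cs.foldl
      (fun (p : Int × Int) c => if c = '\n' then (p.1 + 1, (1 : Int)) else (p.1, p.2 + 1))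
      (line, col) =
    (if PySem.Chars.rfind cs ['\n'] = -1 then (line, col + (cs.length : Int))
     else (line + (cs.count '\n' : Int), (cs.length : Int) - PySem.Chars.rfind cs ['\n'])) := by
  induction cs using List.reverseRecOn with
  | nil =>
    simp [rfind_nil]
  | append_singleton t c ih =>
    rw [List.foldl_append, List.foldl_cons, List.foldl_nil, ih, rfind_append]
    have hne : ¬ ((t.length : Int) = -1) := by omega
    by_cases hr : PySem.Chars.rfind t ['\n'] = -1
    · have h0 : t.count '\n' = 0 :=
        List.count_eq_zero.mpr ((rfind_eq_neg_one_iff t).mp hr)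
      by_cases hc : c = '\n'
      · subst hc
        simp [hr, hne, h0, List.count_append]
      · simp [hr, hc]
        ring
    · by_cases hc : c = '\n'
      · subst hc
        simp [hr, hne, List.count_append, Prod.ext_iff]
        all_goals ring
      · simp [hr, hc, List.count_append, Prod.ext_iff]
        all_goals ring

-- ===== VERDICT (by name: the statement is the Claim_ definition above) =====
theorem inline_getpos_spec : Claim_equal_inline_getpos := by
  intro raw line col _
  unfold Spec_inline_getpos inline_getpos inline_getpos_alt
  rw [PySem.Str.rfind_eq, PySem.Str.count_eq, PySem.Str.len_eq]
  have hnl : ("\n" : String).toList = ['\n'] := by decide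
  rw [hnl, count_newline, fold_eq_closed]
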